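-- pv_equiv track=rewrite | github.com/AbhinavMangalore16/leetcode-solutions | 2067-MaximumNumberOfPointsWithCost/2067-MaximumNumberOfPointsWithCost.py | maxPoints
-- ===== SOURCE A (Python) =====
-- from typing import List
--
-- def maxPoints(points: List[List[int]]) -> int:
--     R = len(points)
--     C = len(points[0])
--     row = points[0]
--     for r in range(1, R):
--         next_row = points[r].copy()
--         left, right = [0]*C, [0]*C
--         left[0] = row[0]
--         for c in range(1, C):
--             left[c] = max(left[c-1]-1, row[c])
--         right[-1] = row[-1]
--         for c in range(C-2, -1,-1):
--             right[c] = max(right[c+1]-1, row[c])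
--         for c in range(C):
--             next_row[c] += max(left[c], right[c])
--         row = next_row
--     return max(row)
-- ===== SOURCE B (Python) =====
-- from typing import List
--
-- def maxPoints(points: List[List[int]]) -> int:
--     prev = points[0]
--     for row in points[1:]:
--         prev = [v + max(p - abs(c - cp) for cp, p in enumerate(prev))
--                 for c, v in enumerate(row)]
--     return max(prev)
-- ===== Notes on version B (the rewrite author's own statement) =====
-- stated objective: simpler
-- what changed: B replaces A's two left/right running-max passes per row by the direct quadratic DP cur[c] = row[c] + max over all previous columns cp of prev[cp] - |c - cp|, stating the recurrence in one comprehension.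
-- outside the precondition, e.g. on maxPoints([[1, 2], [3, 4, 100]]): A returns 100, B returns 101; on maxPoints([[5], [1, 2]]): A returns 6, B returns 6
import Mathlib
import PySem

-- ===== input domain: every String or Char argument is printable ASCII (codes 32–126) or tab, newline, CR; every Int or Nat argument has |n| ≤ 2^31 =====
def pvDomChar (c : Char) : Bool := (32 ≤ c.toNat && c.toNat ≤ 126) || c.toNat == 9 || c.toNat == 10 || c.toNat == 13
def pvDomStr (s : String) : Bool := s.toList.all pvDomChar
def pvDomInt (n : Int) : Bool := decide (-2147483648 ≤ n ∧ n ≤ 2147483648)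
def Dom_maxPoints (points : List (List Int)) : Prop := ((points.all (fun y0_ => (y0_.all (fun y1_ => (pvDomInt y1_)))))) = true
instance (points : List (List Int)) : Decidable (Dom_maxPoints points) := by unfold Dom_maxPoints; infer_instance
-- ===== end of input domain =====

-- B replaces A's left/right running-max passes by the direct quadratic DP
-- (cur[c] = row[c] + max over all previous columns cp of prev[cp] - |c - cp|);
-- objective: simpler (B is shorter and states the recurrence directly; it is not faster).

-- ===== PORT A =====
-- forward pass: left[0] = row[0]; left[c] = max(left[c-1]-1, row[c])
def runL : Int → List Int → List Int
  | a, [] => [a]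
  | a, y :: ys => a :: runL (max (a - 1) y) ys

-- backward pass: right[C-1] = row[C-1]; right[c] = max(right[c+1]-1, row[c])
def runR : List Int → List Int
  | [] => []
  | [x] => [x]
  | x :: y :: ys => max ((runR (y :: ys)).headI - 1) x :: runR (y :: ys)

-- one row transition: next_row[c] += max(left[c], right[c])
def stepA (row nxt : List Int) : List Int :=
  match row with
  | [] => nxt   -- unreachable under Pre_ (Python raises when the first row is empty)
  | a :: ys =>
    List.zipWith (· + ·) nxt (List.zipWith max (runL a ys) (runR (a :: ys)))

def maxPoints (points : List (List Int)) : Int :=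
  match points with
  | [] => 0    -- unreachable under Pre_ (Python raises IndexError on [])
  | row0 :: rest => (PySem.List.max? (rest.foldl stepA row0) (fun x => x)).getD 0

-- ===== PORT B =====
-- max(p - abs(c - cp) for cp, p in enumerate(prev))
def bestB (prev : List Int) (c : Int) : Int :=
  (PySem.List.max? ((PySem.List.enumerate prev).map (fun cp => cp.2 - |c - cp.1|))
    (fun x => x)).getD 0

-- prev = [v + max(...) for c, v in enumerate(row)]
def stepB (prev row : List Int) : List Int :=
  (PySem.List.enumerate row).map (fun cv => cv.2 + bestB prev cv.1)

def maxPoints_alt (points : List (List Int)) : Int :=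
  match points with
  | [] => 0    -- unreachable under Pre_ (Python raises IndexError on [])
  | row0 :: rest => (PySem.List.max? (rest.foldl stepB row0) (fun x => x)).getD 0

-- ===== PRECONDITION & SPEC =====
-- Pre_ excludes the empty grid and ragged grids: on [] or with a row shorter than the
-- first A raises (IndexError/ValueError), and with a row LONGER than the first both
-- programs return, but A's final max accidentally includes the untouched copied tail
-- entries of the last row — an artefact of a shape the function was never meant for.
def Pre_maxPoints (points : List (List Int)) : Prop :=
  points ≠ [] ∧ points.headI ≠ [] ∧ ∀ r ∈ points, r.length = points.headI.length
instance (points : List (List Int)) : Decidable (Pre_maxPoints points) := by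
  unfold Pre_maxPoints; infer_instance

def pvWitness_maxPoints : List (List Int) := [[1, 2, 3], [4, 0, 1]]

def Spec_maxPoints (points : List (List Int)) (out : Int) : Prop := out = maxPoints_alt points
instance (points : List (List Int)) (out : Int) : Decidable (Spec_maxPoints points out) := by unfold Spec_maxPoints; infer_instance

-- ===== CLAIM (what is proved, stated in full; the proofs are below) =====
def Claim_equal_maxPoints : Prop := ∀ (points : List (List Int)), Dom_maxPoints points → Pre_maxPoints points → Spec_maxPoints points (maxPoints points)

-- ===== LEMMAS AND PROOFS =====

-- max over f 0 .. f n
def nmax (f : Nat → Int) : Nat → Int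
  | 0 => f 0
  | n + 1 => max (nmax f n) (f (n + 1))

theorem nmax_congr {f g : Nat → Int} {n : Nat} (h : ∀ j ≤ n, f j = g j) :
    nmax f n = nmax g n := by
  induction n with
  | zero => simpa [nmax] using h 0 (by omega)
  | succ n ih =>
    simp only [nmax]
    rw [ih (fun j hj => h j (by omega)), h (n + 1) (by omega)]

theorem nmax_sub_one (f : Nat → Int) (n : Nat) :
    nmax (fun j => f j - 1) n = nmax f n - 1 := by
  induction n with
  | zero => simp [nmax]
  | succ n ih => simp [nmax, ih, max_sub_sub_right]

theorem nmax_succ_head (f : Nat → Int) (n : Nat) :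
    nmax f (n + 1) = max (f 0) (nmax (fun k => f (k + 1)) n) := by
  induction n with
  | zero => simp [nmax]
  | succ n ih =>
    calc nmax f (n + 2) = max (nmax f (n + 1)) (f (n + 2)) := rfl
    _ = max (max (f 0) (nmax (fun k => f (k + 1)) n)) (f (n + 2)) := by rw [ih]
    _ = max (f 0) (nmax (fun k => f (k + 1)) (n + 1)) := by
          rw [max_assoc]; rfl

theorem self_le_nmax (f : Nat → Int) (n : Nat) : f n ≤ nmax f n := by
  cases n with
  | zero => simp [nmax]
  | succ n => simp [nmax]

theorem nmax_split (f : Nat → Int) (c m : Nat) :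
    nmax f (c + m) = max (nmax f c) (nmax (fun k => f (c + k)) m) := by
  induction m with
  | zero => simp [nmax, max_eq_left (self_le_nmax f c)]
  | succ m ih =>
    show max (nmax f (c + m)) (f (c + m + 1)) = _
    rw [ih, max_assoc]; rfl

-- ---- A side: the forward pass ----
def blS (row : List Int) : Nat → Int
  | 0 => row.getD 0 0
  | i + 1 => max (blS row i - 1) (row.getD (i + 1) 0)

theorem blS_shift (a y : Int) (ys : List Int) (i : Nat) :
    blS (max (a - 1) y :: ys) i = blS (a :: y :: ys) (i + 1) := by
  induction i with
  | zero => simp [blS]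
  | succ i ih => simp [blS, ih]

theorem runL_getD (ys : List Int) (a : Int) (i : Nat) (h : i ≤ ys.length) :
    (runL a ys).getD i 0 = blS (a :: ys) i := by
  induction ys generalizing a i with
  | nil =>
    cases i with
    | zero => simp [runL, blS]
    | succ i => exact absurd h (by simp)
  | cons y ys ih =>
    cases i with
    | zero => simp [runL, blS]
    | succ i =>
      have h2 := (ih (max (a - 1) y) i (by simpa using h)).trans (blS_shift a y ys i)
      rw [show runL a (y :: ys) = a :: runL (max (a - 1) y) ys from rfl,
        List.getD_cons_succ]
      exact h2

theorem blS_eq_nmax (row : List Int) (c : Nat) :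
    blS row c = nmax (fun j => row.getD j 0 - ((c : Int) - (j : Int))) c := by
  induction c with
  | zero => simp [blS, nmax]
  | succ c ih =>
    have h1 : (fun j => row.getD j 0 - ((c : Int) - (j : Int)) - 1)
        = (fun j => row.getD j 0 - (((c + 1 : Nat) : Int) - (j : Int))) := by
      funext j; push_cast; ring
    calc blS row (c + 1) = max (blS row c - 1) (row.getD (c + 1) 0) := rfl
    _ = max (nmax (fun j => row.getD j 0 - ((c : Int) - (j : Int))) c - 1)
          (row.getD (c + 1) 0) := by rw [ih]
    _ = max (nmax (fun j => row.getD j 0 - (((c + 1 : Nat) : Int) - (j : Int))) c)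
          (row.getD (c + 1) 0) := by rw [← nmax_sub_one, h1]
    _ = _ := by simp [nmax]

-- ---- A side: the backward pass ----
def brS : List Int → Int
  | [] => 0
  | [z] => z
  | z :: w :: zs => max (brS (w :: zs) - 1) z

theorem runR_ne_nil (x : Int) (l : List Int) : runR (x :: l) ≠ [] := by
  cases l <;> simp [runR]

theorem runR_getD (row : List Int) (i : Nat) :
    (runR row).getD i 0 = brS (row.drop i) := by
  induction row using runR.induct generalizing i with
  | case1 => simp [runR, brS]
  | case2 x =>
    cases i with
    | zero => simp [runR, brS]
    | succ i => simp [runR, brS]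
  | case3 x y ys ih =>
    cases i with
    | zero =>
      have h0 : (runR (y :: ys)).headI = brS (y :: ys) := by
        have := ih 0
        cases hr : runR (y :: ys) with
        | nil => exact absurd hr (runR_ne_nil y ys)
        | cons b t => simpa [hr] using this
      simp [runR, brS, h0]
    | succ i => simpa [runR] using ih i

theorem brS_eq_nmax (l : List Int) (hl : l ≠ []) :
    brS l = nmax (fun k => l.getD k 0 - (k : Int)) (l.length - 1) := by
  induction l using brS.induct with
  | case1 => exact absurd rfl hl
  | case2 z => simp [brS, nmax]
  | case3 z w zs ih =>
    have ih' := ih (by simp)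
    have hshift : (fun k => (z :: w :: zs).getD (k + 1) 0 - ((k + 1 : Nat) : Int))
        = (fun k => ((w :: zs).getD k 0 - (k : Int)) - 1) := by
      funext k; push_cast; simp; ring
    calc brS (z :: w :: zs) = max (brS (w :: zs) - 1) z := rfl
    _ = max (nmax (fun k => (w :: zs).getD k 0 - (k : Int)) ((w :: zs).length - 1) - 1) z := by
          rw [ih']
    _ = _ := by
          have hlen : (z :: w :: zs).length - 1 = zs.length + 1 := by simp
          rw [hlen, nmax_succ_head]
          rw [hshift, nmax_sub_one]
          simp [max_comm, List.length_cons]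

-- ---- B side ----
theorem foldl_max_init (t : List Int) (a b : Int) :
    t.foldl max (max a b) = max a (t.foldl max b) := by
  induction t generalizing a b with
  | nil => simp
  | cons z t ih =>
    simp only [List.foldl_cons]
    rw [max_assoc, ih]

theorem foldl_max_eq_nmax (t : List Int) (x : Int) :
    t.foldl max x = nmax (fun k => (x :: t).getD k 0) t.length := by
  induction t generalizing x with
  | nil => simp [nmax]
  | cons y t ih =>
    have hshift : (fun k => (x :: y :: t).getD (k + 1) 0) = (fun k => (y :: t).getD k 0) := by
      funext k; simp
    calc (y :: t).foldl max x = t.foldl max (max x y) := rfl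
    _ = max x (t.foldl max y) := foldl_max_init t x y
    _ = max x (nmax (fun k => (y :: t).getD k 0) t.length) := by rw [ih]
    _ = _ := by rw [List.length_cons, nmax_succ_head, hshift]; simp

theorem maxid_eq_nmax (l : List Int) (hl : l ≠ []) :
    (PySem.List.max? l (fun x => x)).getD 0 = nmax (fun k => l.getD k 0) (l.length - 1) := by
  cases l with
  | nil => exact absurd rfl hl
  | cons x t =>
    rw [PySem.List.max?_id_cons]
    simpa using foldl_max_eq_nmax t x

theorem bestB_eq_nmax (prev : List Int) (c : Int) (hp : prev ≠ []) :
    bestB prev c = nmax (fun j => prev.getD j 0 - |c - (j : Int)|) (prev.length - 1) := by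
  have hpos : 0 < prev.length := List.length_pos_iff.mpr hp
  have hlen : ((PySem.List.enumerate prev).map (fun cp => cp.2 - |c - cp.1|)).length
      = prev.length := by simp [PySem.List.length_enumerate]
  have hl : (PySem.List.enumerate prev).map (fun cp => cp.2 - |c - cp.1|) ≠ [] := by
    intro h; rw [h] at hlen; simp at hlen; omega
  rw [bestB, maxid_eq_nmax _ hl, hlen]
  apply nmax_congr
  intro j hj
  have hjlt : j < prev.length := by omega
  have h1 : ((PySem.List.enumerate prev).map (fun cp => cp.2 - |c - cp.1|))[j]?
      = some (prev[j] - |c - (j : Int)|) := by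
    simp [List.getElem?_map, PySem.List.getElem?_enumerate, List.getElem?_eq_getElem hjlt]
  simp [List.getD_eq_getElem?_getD, h1, List.getElem?_eq_getElem hjlt]

theorem getD_drop (l : List Int) (c k : Nat) :
    (l.drop c).getD k 0 = l.getD (c + k) 0 := by
  induction c generalizing l with
  | zero => simp
  | succ c ih =>
    cases l with
    | nil => simp
    | cons x l =>
      rw [show c + 1 + k = (c + k) + 1 from by omega]
      simp only [List.drop_succ_cons, List.getD_cons_succ]
      exact ih l

-- the heart: left/right running maxima = direct max over all previous columns
theorem key_pt (prev : List Int) (c : Nat) (_hp : prev ≠ []) (hc : c < prev.length) :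
    max (blS prev c) (brS (prev.drop c)) =
      nmax (fun j => prev.getD j 0 - |(c : Int) - (j : Int)|) (prev.length - 1) := by
  rw [show prev.length - 1 = c + (prev.length - 1 - c) from by omega, nmax_split]
  congr 1
  · rw [blS_eq_nmax]
    apply nmax_congr
    intro j hj
    rw [abs_of_nonneg (by
      have : (j : Int) ≤ (c : Int) := by exact_mod_cast hj
      omega)]
  · have hd : prev.drop c ≠ [] := by
      intro h
      have := congrArg List.length h
      simp [List.length_drop] at this
      omega
    rw [brS_eq_nmax _ hd]
    rw [show (prev.drop c).length - 1 = prev.length - 1 - c from by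
      simp [List.length_drop]; omega]
    apply nmax_congr
    intro k hk
    rw [getD_drop]
    congr 1
    rw [show ((c + k : Nat) : Int) = (c : Int) + (k : Int) from by push_cast; ring,
      show (c : Int) - ((c : Int) + (k : Int)) = -(k : Int) from by ring, abs_neg,
      abs_of_nonneg (by positivity)]

theorem stepB_length (prev row : List Int) : (stepB prev row).length = row.length := by
  simp [stepB, PySem.List.length_enumerate]

theorem runL_length (a : Int) (ys : List Int) : (runL a ys).length = ys.length + 1 := by
  induction ys generalizing a with
  | nil => simp [runL]
  | cons y ys ih => simp [runL, ih]

theorem runR_length (l : List Int) : (runR l).length = l.length := by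
  induction l using runR.induct with
  | case1 => simp [runR]
  | case2 x => simp [runR]
  | case3 x y ys ih => simp [runR, ih]

theorem stepAB (prev nxt : List Int) (hp : prev ≠ []) (hlen : nxt.length = prev.length) :
    stepA prev nxt = stepB prev nxt := by
  cases prev with
  | nil => exact absurd rfl hp
  | cons a ys =>
    have hC : nxt.length = ys.length + 1 := by simpa using hlen
    apply List.ext_getElem
    · simp [stepA, stepB, runL_length, runR_length, PySem.List.length_enumerate, hC]
    · intro i h1 h2
      have hi : i < nxt.length := by
        have := stepB_length (a :: ys) nxt
        omega
      have hi' : i < ys.length + 1 := by omega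
      have hL : (runL a ys).getD i 0 = blS (a :: ys) i := runL_getD ys a i (by omega)
      have hR : (runR (a :: ys)).getD i 0 = brS ((a :: ys).drop i) := runR_getD (a :: ys) i
      have hkey := key_pt (a :: ys) i (by simp) (by simpa using hi')
      have hb := bestB_eq_nmax (a :: ys) (i : Int) (by simp)
      simp only [stepA, stepB, List.getElem_zipWith, List.getElem_map,
        PySem.List.getElem_enumerate]
      have e1 : (runL a ys)[i]'(by rw [runL_length]; exact hi') = blS (a :: ys) i := by
        rw [← List.getD_eq_getElem (runL a ys) 0 (by rw [runL_length]; exact hi')]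
        exact hL
      have e2 : (runR (a :: ys))[i]'(by rw [runR_length]; simpa using hi')
          = brS ((a :: ys).drop i) := by
        rw [← List.getD_eq_getElem (runR (a :: ys)) 0 (by rw [runR_length]; simpa using hi')]
        exact hR
      rw [e1, e2, hkey, ← hb]
      norm_num

theorem fold_eq (rest : List (List Int)) (acc : List Int) (hne : acc ≠ [])
    (hlen : ∀ r ∈ rest, r.length = acc.length) :
    rest.foldl stepA acc = rest.foldl stepB acc := by
  induction rest generalizing acc with
  | nil => rfl
  | cons r rest ih =>
    have hr : r.length = acc.length := hlen r (by simp)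
    have h1 : stepA acc r = stepB acc r := stepAB acc r hne (by rw [hr])
    have hne' : stepB acc r ≠ [] := by
      have : (stepB acc r).length = r.length := stepB_length acc r
      intro h; rw [h] at this
      have : acc.length = 0 := by simp at this; omega
      exact hne (List.eq_nil_of_length_eq_zero this)
    have hlen' : ∀ r' ∈ rest, r'.length = (stepB acc r).length := by
      intro r' hr'
      rw [stepB_length acc r, hr]
      exact hlen r' (by simp [hr'])
    simp only [List.foldl_cons, h1]
    exact ih (stepB acc r) hne' hlen'

-- ===== VERDICT (by name: the statement is the Claim_ definition above) =====
theorem maxPoints_spec : Claim_equal_maxPoints := by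
  intro points _ hpre
  obtain ⟨hne, hrow0, hrect⟩ := hpre
  cases points with
  | nil => exact absurd rfl hne
  | cons row0 rest =>
    show maxPoints (row0 :: rest) = maxPoints_alt (row0 :: rest)
    simp only [maxPoints, maxPoints_alt]
    rw [fold_eq rest row0 (by simpa using hrow0)
      (fun r hr => by simpa using hrect r (by simp [hr]))]
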